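-- pv_equiv track=rewrite | github.com/Cosetto/Bgi_asdis | src/common/asdis.py | replace_quote_commas
-- ===== SOURCE A (Python) =====
-- comma_replace     = '@@@z@@Q@@@'
--
-- def replace_quote_commas(line, quotes):
-- 	pos = 0
-- 	commas = []
-- 	while True:
-- 		pos = line.find(',', pos)
-- 		if pos == -1:
-- 			break
-- 		for squote, equote in zip(quotes[::2], quotes[1::2]):
-- 			if squote < pos < equote:
-- 				commas.append(pos)
-- 				break
-- 		pos += 1
-- 	commas.reverse()
-- 	for pos in commas:
-- 		line = line[:pos] + comma_replace + line[pos+1:]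
-- 	return line
-- ===== SOURCE B (Python) =====
-- comma_replace     = '@@@z@@Q@@@'
--
-- def replace_quote_commas(line, quotes):
-- 	pairs = list(zip(quotes[::2], quotes[1::2]))
-- 	out = []
-- 	for i, ch in enumerate(line):
-- 		if ch == ',' and any(s < i < e for s, e in pairs):
-- 			out.append(comma_replace)
-- 		else:
-- 			out.append(ch)
-- 	return ''.join(out)
-- ===== Notes on version B (the rewrite author's own statement) =====
-- stated objective: alternative
-- what changed: A repeatedly str.find's commas and rebuilds the whole string once per matched comma (back to front); B is a single left-to-right pass that emits the token or the character per position into a list joined once.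
import Mathlib
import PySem

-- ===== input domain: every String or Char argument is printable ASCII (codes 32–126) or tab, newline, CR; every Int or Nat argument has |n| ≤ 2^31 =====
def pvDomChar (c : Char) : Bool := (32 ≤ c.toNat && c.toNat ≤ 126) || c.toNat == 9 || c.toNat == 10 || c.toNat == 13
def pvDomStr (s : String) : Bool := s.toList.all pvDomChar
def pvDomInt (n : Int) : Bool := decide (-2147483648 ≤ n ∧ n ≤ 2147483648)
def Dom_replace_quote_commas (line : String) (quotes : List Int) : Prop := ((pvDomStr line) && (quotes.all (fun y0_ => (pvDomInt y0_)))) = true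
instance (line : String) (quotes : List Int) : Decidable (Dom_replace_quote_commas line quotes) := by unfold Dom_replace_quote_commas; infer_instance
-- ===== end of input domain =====

-- B replaces A's repeated find/whole-string-rebuild with a single left-to-right pass that emits token-or-char once per position (alternative algorithm, same result).


-- ===== PORT A =====
-- comma_replace = '@@@z@@Q@@@'
def commaReplace : String := "@@@z@@Q@@@"

-- first index of ',' in a list, if any (used only to SPECIFY PySem.Str.findFrom for the
-- termination proof of the search loop; the ports themselves call PySem.Str.findFrom)
def firstComma : List Char → Option Nat
  | [] => none
  | c :: t => if c = ',' then some 0 else (firstComma t).map (· + 1)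

theorem find_go_comma (us : List Char) (k : Nat) :
    PySem.Chars.find.go [','] us k =
      match firstComma us with
      | some j => ((k + j : Nat) : Int)
      | none => -1 := by
  induction us generalizing k with
  | nil => simp [PySem.Chars.find.go, firstComma]
  | cons c t ih =>
    have hstep : PySem.Chars.find.go [','] (c :: t) k =
        if [','].isPrefixOf (c :: t) then (k : Int) else PySem.Chars.find.go [','] t (k + 1) := rfl
    rw [hstep]
    by_cases hc : c = ','
    · subst hc
      simp [List.isPrefixOf, firstComma]
    · have hpre : ([','].isPrefixOf (c :: t)) = false := by
        simp only [List.isPrefixOf, Bool.and_eq_false_iff]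
        left
        simp only [beq_eq_false_iff_ne, ne_eq]
        exact fun he => hc he.symm
      rw [hpre]
      simp only [Bool.false_eq_true, if_false]
      rw [ih (k + 1)]
      have hfc : firstComma (c :: t) = (firstComma t).map (fun x => x + 1) := by
        simp [firstComma, hc]
      rw [hfc]
      cases h : firstComma t with
      | none => simp
      | some j =>
        simp only [Option.map_some]
        show ((k + 1 + j : Nat) : Int) = ((k + (j + 1) : Nat) : Int)
        omega

theorem findFrom_comma (cs : List Char) (pos : Nat) :
    PySem.Chars.findFrom cs [','] (pos : Int) none =
      match firstComma (cs.drop pos) with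
      | some j => ((pos + j : Nat) : Int)
      | none => -1 := by
  have hred : PySem.Chars.findFrom cs [','] (pos : Int) none =
      (if (cs.length : Int) < (pos : Int) then (-1 : Int)
       else if PySem.Chars.find (cs.drop pos) [','] = -1 then -1
            else (pos : Int) + PySem.Chars.find (cs.drop pos) [',']) := by
    unfold PySem.Chars.findFrom
    simp only []
    rw [if_neg (by omega : ¬ ((pos : Int) < 0))]
    simp only [Int.toNat_natCast, List.take_length]
  rw [hred]
  unfold PySem.Chars.find
  rw [find_go_comma]
  by_cases h : (cs.length : Int) < (pos : Int)
  · rw [if_pos h]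
    rw [List.drop_eq_nil_of_le (by omega : cs.length ≤ pos)]
    simp [firstComma]
  · rw [if_neg h]
    cases hf : firstComma (cs.drop pos) with
    | none => simp
    | some j =>
      simp only [Nat.zero_add]
      rw [if_neg (by omega : ¬ (((j : Nat) : Int) = -1))]
      push_cast
      ring

theorem firstComma_some_decomp {us : List Char} {j : Nat} (h : firstComma us = some j) :
    ∃ u v, us = u ++ ',' :: v ∧ u.length = j ∧ ',' ∉ u := by
  induction us generalizing j with
  | nil => simp [firstComma] at h
  | cons c t ih =>
    by_cases hc : c = ','
    · subst hc
      simp [firstComma] at h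
      exact ⟨[], t, by simp [← h]⟩
    · simp [firstComma, hc] at h
      obtain ⟨j', hj', rfl⟩ := h
      obtain ⟨u, v, rfl, hlen, hmem⟩ := ih hj'
      refine ⟨c :: u, v, by simp, by simp [hlen], ?_⟩
      simp only [List.mem_cons, not_or]
      exact ⟨fun he => hc he.symm, hmem⟩

-- inner 'for squote, equote in zip(...): if squote < pos < equote: append; break'
def hitsA : List (Int × Int) → Nat → Bool
  | [], _ => false
  | q :: rest, p => if q.1 < (p : Int) ∧ (p : Int) < q.2 then true else hitsA rest p

-- the 'while True' search loop of A: collects the positions of commas inside quotes, in order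
-- (pos is always a nonnegative index, so Nat is exact; f.toNat is exact since f ≠ -1 means f ≥ 0)
def searchLoopA (line : String) (pairs : List (Int × Int)) (pos : Nat) : List Nat :=
  if _hf : PySem.Str.findFrom line "," (pos : Int) none = -1 then []
  else
    (if hitsA pairs (PySem.Str.findFrom line "," (pos : Int) none).toNat
     then [(PySem.Str.findFrom line "," (pos : Int) none).toNat] else [])
    ++ searchLoopA line pairs ((PySem.Str.findFrom line "," (pos : Int) none).toNat + 1)
termination_by line.toList.length - pos
decreasing_by
  rw [PySem.Str.findFrom_eq] at _hf ⊢
  simp only [show ("," : String).toList = [','] from rfl] at _hf ⊢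
  rw [findFrom_comma] at _hf ⊢
  cases hf2 : firstComma (line.toList.drop pos) with
  | none => rw [hf2] at _hf; exact absurd rfl _hf
  | some j =>
    obtain ⟨u, v, hdec, hlen, _⟩ := firstComma_some_decomp hf2
    have h1 := congrArg List.length hdec
    have h2 : (line.toList.drop pos).length = line.toList.length - pos := by simp
    simp only [List.length_append, List.length_cons] at h1
    show line.toList.length - ((((pos + j : Nat) : Int)).toNat + 1) < line.toList.length - pos
    simp only [Int.toNat_natCast]
    omega

def replace_quote_commas (line : String) (quotes : List Int) : String :=
  -- quotes[::2] / quotes[1::2]: step-2 slices (step ≠ 0, so slice? is always 'some')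
  let pairs := List.zip ((PySem.List.slice? quotes none none 2).getD [])
                        ((PySem.List.slice? quotes (some 1) none 2).getD [])
  let commas := searchLoopA line pairs 0
  -- commas.reverse(); for pos in commas: line = line[:pos] + comma_replace + line[pos+1:]
  -- (string slicing / concatenation done on the code-point list, exact for in-range pos)
  String.mk (commas.reverse.foldl
    (fun (acc : List Char) (p : Nat) =>
      PySem.List.slice acc none (some (p : Int)) ++ commaReplace.toList
        ++ PySem.List.slice acc (some ((p : Int) + 1)) none)
    line.toList)

-- ===== PORT B =====
-- 'for i, ch in enumerate(line): out.append(token if ch == ',' and any(...) else ch)'; ''.join(out)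
def buildB (pairs : List (Int × Int)) (i : Nat) : List Char → List Char
  | [] => []
  | c :: rest =>
      (if c = ',' && pairs.any (fun q => decide (q.1 < (i : Int)) && decide ((i : Int) < q.2))
       then commaReplace.toList else [c]) ++ buildB pairs (i + 1) rest

def replace_quote_commas_alt (line : String) (quotes : List Int) : String :=
  let pairs := List.zip ((PySem.List.slice? quotes none none 2).getD [])
                        ((PySem.List.slice? quotes (some 1) none 2).getD [])
  String.mk (buildB pairs 0 line.toList)

-- ===== PRECONDITION & SPEC =====
def Spec_replace_quote_commas (line : String) (quotes : List Int) (out : String) : Prop := out = replace_quote_commas_alt line quotes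
instance (line : String) (quotes : List Int) (out : String) : Decidable (Spec_replace_quote_commas line quotes out) := by unfold Spec_replace_quote_commas; infer_instance

-- ===== CLAIM (what is proved, stated in full; the proofs are below) =====
def Claim_equal_replace_quote_commas : Prop := ∀ (line : String) (quotes : List Int), Dom_replace_quote_commas line quotes → Spec_replace_quote_commas line quotes (replace_quote_commas line quotes)

-- ===== LEMMAS AND PROOFS =====

theorem firstComma_none {us : List Char} (h : firstComma us = none) : ',' ∉ us := by
  induction us with
  | nil => simp
  | cons c t ih =>
    by_cases hc : c = ','
    · subst hc; simp [firstComma] at h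
    · simp [firstComma, hc] at h
      have h2 := ih h
      simp only [List.mem_cons]
      exact fun hh => hh.elim (fun he => hc he.symm) h2


theorem searchLoopA_eq (line : String) (pairs : List (Int × Int)) (pos : Nat) :
    searchLoopA line pairs pos =
      if PySem.Str.findFrom line "," (pos : Int) none = -1 then []
      else
        (if hitsA pairs (PySem.Str.findFrom line "," (pos : Int) none).toNat
         then [(PySem.Str.findFrom line "," (pos : Int) none).toNat] else [])
        ++ searchLoopA line pairs ((PySem.Str.findFrom line "," (pos : Int) none).toNat + 1) := by
  rw [searchLoopA, dite_eq_ite]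



theorem hitsA_eq (pairs : List (Int × Int)) (p : Nat) :
    hitsA pairs p = pairs.any (fun q => decide (q.1 < (p : Int)) && decide ((p : Int) < q.2)) := by
  induction pairs with
  | nil => rfl
  | cons q rest ih =>
    by_cases h : q.1 < (p : Int) ∧ (p : Int) < q.2
    · simp [hitsA, h]
    · have hfalse : (decide (q.1 < (p : Int)) && decide ((p : Int) < q.2)) = false := by
        rcases not_and_or.mp h with h1 | h1 <;> simp [h1]
      simp [hitsA, if_neg h, hfalse, ih]

theorem buildB_no_comma (pairs : List (Int × Int)) (u v : List Char) (i : Nat) :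
    ',' ∉ u → buildB pairs i (u ++ v) = u ++ buildB pairs (i + u.length) v := by
  induction u generalizing i with
  | nil => intro _; simp
  | cons c t ih =>
    intro h
    have hc : ¬ (c = ',') := fun hh => h (by simp [hh])
    have h2 : ',' ∉ t := fun hm => h (by simp [hm])
    simp only [List.cons_append, buildB, hc, decide_false, Bool.false_and, Bool.false_eq_true,
      if_false]
    rw [ih (i + 1) h2]
    simp only [List.length_cons]
    have hn : i + 1 + t.length = i + (t.length + 1) := by omega
    rw [hn]
    simp

theorem buildB_id (pairs : List (Int × Int)) (u : List Char) (i : Nat) (h : ',' ∉ u) :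
    buildB pairs i u = u := by
  have := buildB_no_comma pairs u [] i h
  simpa [buildB] using this

-- the splice A performs once per collected comma
def spliceA (acc : List Char) (p : Nat) : List Char :=
  PySem.List.slice acc none (some (p : Int)) ++ commaReplace.toList
    ++ PySem.List.slice acc (some ((p : Int) + 1)) none

theorem spliceA_eq (acc : List Char) (p : Nat) :
    spliceA acc p = acc.take p ++ commaReplace.toList ++ acc.drop (p + 1) := by
  unfold spliceA
  rw [PySem.List.slice_to_natCast]
  have : ((p : Int) + 1) = ((p + 1 : Nat) : Int) := by push_cast; ring
  rw [this, PySem.List.slice_from_natCast]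

theorem main_loop (line : String) (pairs : List (Int × Int)) (pos : Nat) :
    (searchLoopA line pairs pos).reverse.foldl spliceA line.toList
      = line.toList.take pos ++ buildB pairs pos (line.toList.drop pos) := by
  generalize hm : line.toList.length - pos = m
  induction m using Nat.strong_induction_on generalizing pos with
  | _ m ih =>
  subst hm
  cases hf : firstComma (line.toList.drop pos) with
  | none =>
    have hF : PySem.Str.findFrom line "," (pos : Int) none = -1 := by
      rw [PySem.Str.findFrom_eq]
      simp only [show ("," : String).toList = [','] from rfl]
      rw [findFrom_comma, hf]
    rw [searchLoopA_eq, if_pos hF]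
    simp only [List.reverse_nil, List.foldl_nil]
    rw [buildB_id pairs _ pos (firstComma_none hf), List.take_append_drop]
  | some j =>
    obtain ⟨u, v, hdec, hlen, hnm⟩ := firstComma_some_decomp hf
    have hjlt : pos + j < line.toList.length := by
      have h1 := congrArg List.length hdec
      have h2 : (line.toList.drop pos).length = line.toList.length - pos := by simp
      simp only [List.length_append, List.length_cons] at h1
      omega
    have hElen : (line.toList.take pos).length = pos := by
      simp only [List.length_take]; omega
    have hF : PySem.Str.findFrom line "," (pos : Int) none = ((pos + j : Nat) : Int) := by
      rw [PySem.Str.findFrom_eq]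
      simp only [show ("," : String).toList = [','] from rfl]
      rw [findFrom_comma, hf]
    have hne : ¬ (PySem.Str.findFrom line "," (pos : Int) none = -1) := by
      rw [hF]; omega
    rw [searchLoopA_eq, if_neg hne, hF]
    simp only [Int.toNat_natCast]
    have hcs : line.toList = (line.toList.take pos ++ u) ++ ',' :: v := by
      conv_lhs => rw [← List.take_append_drop pos line.toList]
      rw [hdec, List.append_assoc]
    have hEu : (line.toList.take pos ++ u).length = pos + j := by
      simp [hElen, hlen]
    have ihm := ih (line.toList.length - (pos + j + 1)) (by omega) (pos + j + 1) rfl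
    have htake1 : line.toList.take (pos + j + 1) = (line.toList.take pos ++ u) ++ [','] := by
      conv_lhs => rw [hcs]
      rw [List.take_append, List.take_of_length_le (by omega)]
      congr 1
      rw [show pos + j + 1 - (line.toList.take pos ++ u).length = 1 by omega]
      simp
    have hdrop1 : line.toList.drop (pos + j + 1) = v := by
      conv_lhs => rw [hcs]
      rw [List.drop_append, List.drop_eq_nil_of_le (by omega)]
      rw [show pos + j + 1 - (line.toList.take pos ++ u).length = 1 by omega]
      simp
    have hstep : buildB pairs pos (line.toList.drop pos)
        = u ++ ((if hitsA pairs (pos + j) then commaReplace.toList else [','])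
                  ++ buildB pairs (pos + j + 1) v) := by
      rw [hdec, buildB_no_comma pairs u (',' :: v) pos hnm, hlen]
      congr 1
      simp only [buildB]
      rw [← hitsA_eq]
      simp
    rw [hstep]
    by_cases hh : hitsA pairs (pos + j) = true
    · rw [if_pos hh, if_pos hh]
      simp only [List.singleton_append, List.reverse_cons, List.foldl_append, List.foldl_cons,
        List.foldl_nil]
      rw [ihm, htake1, hdrop1, spliceA_eq]
      rw [List.append_assoc (line.toList.take pos ++ u) [','] _]
      rw [List.take_left' hEu]
      rw [← List.append_assoc (line.toList.take pos ++ u) [','] _]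
      rw [List.drop_left' (by simp only [List.length_append, hEu, List.length_cons, List.length_nil])]
      simp [List.append_assoc]
    · rw [if_neg hh, if_neg hh]
      simp only [List.nil_append]
      rw [ihm, htake1, hdrop1]
      simp [List.append_assoc]

-- ===== VERDICT (by name: the statement is the Claim_ definition above) =====
theorem replace_quote_commas_spec : Claim_equal_replace_quote_commas := by
  intro line quotes _
  unfold Spec_replace_quote_commas replace_quote_commas replace_quote_commas_alt
  have h := main_loop line
    (List.zip ((PySem.List.slice? quotes none none 2).getD [])
              ((PySem.List.slice? quotes (some 1) none 2).getD [])) 0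
  simp only [List.take_zero, List.drop_zero, List.nil_append] at h
  exact congrArg String.mk h
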